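-- pv_equiv track=rewrite | github.com/Mobius-One/pyraiders | utils/data_compat.py | update_data
-- ===== SOURCE A (Python) =====
-- def update_data(newDataKey, newDataValue, data):
--     new_data = []
--     for account in data:
--         # Check if the newDataKey already exists in the account
--         if newDataKey not in account:
--             index = [key for key, value in account.items()].index("units")
--
--             data_key_value_pairs = list(account.items())
--             data_key_value_pairs.insert(index, (newDataKey, newDataValue))
--
--             new_account = {}
--             for key, value in data_key_value_pairs:
--                 new_account[key] = value
--             new_data.append(new_account)
--         else:
--             new_data.append(account)
--
--     return new_data
-- ===== SOURCE B (Python) =====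
-- def _insert_before_units(items, newDataKey, newDataValue):
--     if not items:
--         raise ValueError("'units' is not in list")
--     if items[0][0] == "units":
--         return [(newDataKey, newDataValue)] + items
--     return [items[0]] + _insert_before_units(items[1:], newDataKey, newDataValue)
--
--
-- def update_data(newDataKey, newDataValue, data):
--     if not data:
--         return []
--     account = data[0]
--     rest = update_data(newDataKey, newDataValue, data[1:])
--     if newDataKey in account:
--         return [account] + rest
--     return [dict(_insert_before_units(list(account.items()), newDataKey, newDataValue))] + rest
-- ===== Notes on version B (the rewrite author's own statement) =====
-- stated objective: alternative
-- what changed: A iterates over data with an accumulator and, per account, finds the index of 'units' in a separate keys list, inserts into a copied items list and rebuilds the dict in a second loop; B is recursive over data and over each account's items, splicing the new pair in structurally at the first 'units' key with a single recursive helper and one dict() construction.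
import Mathlib
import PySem

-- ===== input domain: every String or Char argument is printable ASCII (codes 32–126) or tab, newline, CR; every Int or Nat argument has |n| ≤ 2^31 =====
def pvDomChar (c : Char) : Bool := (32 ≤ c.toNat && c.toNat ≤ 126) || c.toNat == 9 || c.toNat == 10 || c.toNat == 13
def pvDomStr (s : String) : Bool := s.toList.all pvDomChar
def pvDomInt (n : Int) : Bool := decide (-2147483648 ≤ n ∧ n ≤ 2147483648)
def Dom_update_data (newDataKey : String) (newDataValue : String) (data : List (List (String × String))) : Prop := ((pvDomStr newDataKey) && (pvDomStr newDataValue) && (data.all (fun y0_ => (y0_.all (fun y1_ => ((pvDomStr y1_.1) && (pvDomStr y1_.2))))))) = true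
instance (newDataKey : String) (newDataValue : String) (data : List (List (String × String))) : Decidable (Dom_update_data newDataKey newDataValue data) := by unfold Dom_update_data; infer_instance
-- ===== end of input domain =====

-- B replaces A's accumulator loop + find-index / list.insert / dict-rebuild with structural
-- recursion over the data and a recursive helper that splices the new pair in at the first
-- "units" key (objective: alternative decomposition); equal return value on Pre_.

-- ===== PORT A =====
def update_data (newDataKey : String) (newDataValue : String) (data : List (List (String × String))) : List (List (String × String)) :=
  data.foldl (fun new_data account =>
    if newDataKey ∉ account.map (fun p => p.1) then
      match PySem.List.index? (account.map (fun p => p.1)) "units" with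
      | none => new_data ++ [account]  -- Python: list.index raises ValueError here; Pre_ excludes these inputs
      | some index =>
          let data_key_value_pairs := PySem.List.insert account ((index : Nat) : Int) (newDataKey, newDataValue)
          let new_account := data_key_value_pairs.foldl
            (fun d (p : String × String) => d.insert p.1 p.2)
            (PySem.Dict.empty : PySem.Dict String String)
          new_data ++ [new_account.items]
    else new_data ++ [account]) []

-- ===== PORT B =====
def insertBeforeUnits (newDataKey : String) (newDataValue : String) : List (String × String) → Option (List (String × String))
  | [] => none  -- Python B raises ValueError here; Pre_ excludes these inputs
  | item :: rest =>
      if item.1 == "units" then some ((newDataKey, newDataValue) :: item :: rest)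
      else (insertBeforeUnits newDataKey newDataValue rest).map (fun r => item :: r)

def update_data_alt (newDataKey : String) (newDataValue : String) : List (List (String × String)) → List (List (String × String))
  | [] => []
  | account :: tl =>
      let rest := update_data_alt newDataKey newDataValue tl
      if newDataKey ∈ account.map (fun p => p.1) then account :: rest
      else
        match insertBeforeUnits newDataKey newDataValue account with
        | none => account :: rest  -- Python B raises ValueError here; Pre_ excludes these inputs
        | some l => (PySem.Dict.ofList l).items :: rest

-- ===== PRECONDITION & SPEC =====
-- Each account is a Python dict, so its keys are distinct (the Nodup conjunct only restates the
-- dict representation); the disjunct excludes exactly the inputs where A raises ValueError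
-- ("units" missing from an account that does not already contain newDataKey).
def pvNodupKeys : List String → Bool
  | [] => true
  | x :: xs => !(xs.contains x) && pvNodupKeys xs

def Pre_update_data (newDataKey : String) (newDataValue : String) (data : List (List (String × String))) : Prop :=
  (data.all (fun account =>
    pvNodupKeys (account.map (fun p => p.1)) &&
    ((account.map (fun p => p.1)).contains newDataKey ||
     (account.map (fun p => p.1)).contains "units"))) = true
instance (newDataKey : String) (newDataValue : String) (data : List (List (String × String))) : Decidable (Pre_update_data newDataKey newDataValue data) := by unfold Pre_update_data; infer_instance
def pvWitness_update_data : String × String × (List (List (String × String))) :=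
  ("color", "red", [[("name", "a"), ("units", "5")], [("units", "7")]])
def Spec_update_data (newDataKey : String) (newDataValue : String) (data : List (List (String × String))) (out : List (List (String × String))) : Prop := out = update_data_alt newDataKey newDataValue data
instance (newDataKey : String) (newDataValue : String) (data : List (List (String × String))) (out : List (List (String × String))) : Decidable (Spec_update_data newDataKey newDataValue data out) := by unfold Spec_update_data; infer_instance

-- ===== CLAIM (what is proved, stated in full; the proofs are below) =====
def Claim_equal_update_data : Prop := ∀ (newDataKey : String) (newDataValue : String) (data : List (List (String × String))), Dom_update_data newDataKey newDataValue data → Pre_update_data newDataKey newDataValue data → Spec_update_data newDataKey newDataValue data (update_data newDataKey newDataValue data)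

-- ===== LEMMAS AND PROOFS =====

lemma pvNodupKeys_iff (l : List String) : pvNodupKeys l = true ↔ l.Nodup := by
  induction l with
  | nil => simp [pvNodupKeys]
  | cons x xs ih => simp [pvNodupKeys, ih, List.contains_iff_mem]

lemma pre_elim {nk nv : String} {data : List (List (String × String))}
    (h : Pre_update_data nk nv data) :
    ∀ account ∈ data, (account.map (fun p => p.1)).Nodup ∧
      (nk ∈ account.map (fun p => p.1) ∨ "units" ∈ account.map (fun p => p.1)) := by
  unfold Pre_update_data at h
  rw [List.all_eq_true] at h
  intro account hacc
  have := h account hacc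
  simp only [Bool.and_eq_true, Bool.or_eq_true, List.contains_iff_mem, pvNodupKeys_iff] at this
  exact this

-- per-account value of port A
def accA (newDataKey newDataValue : String) (account : List (String × String)) : List (String × String) :=
  if newDataKey ∉ account.map (fun p => p.1) then
    match PySem.List.index? (account.map (fun p => p.1)) "units" with
    | none => account
    | some index =>
        ((PySem.List.insert account ((index : Nat) : Int) (newDataKey, newDataValue)).foldl
          (fun d (p : String × String) => d.insert p.1 p.2)
          (PySem.Dict.empty : PySem.Dict String String)).items
  else account

-- per-account value of port B
def accB (newDataKey newDataValue : String) (account : List (String × String)) : List (String × String) :=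
  if newDataKey ∈ account.map (fun p => p.1) then account
  else
    match insertBeforeUnits newDataKey newDataValue account with
    | none => account
    | some l => (PySem.Dict.ofList l).items

lemma update_data_eq_map (newDataKey newDataValue : String) (data : List (List (String × String))) :
    update_data newDataKey newDataValue data = data.map (accA newDataKey newDataValue) := by
  unfold update_data
  have hb : (fun (new_data : List (List (String × String))) account =>
      if newDataKey ∉ account.map (fun p => p.1) then
        match PySem.List.index? (account.map (fun p => p.1)) "units" with
        | none => new_data ++ [account]
        | some index =>
            let data_key_value_pairs := PySem.List.insert account ((index : Nat) : Int) (newDataKey, newDataValue)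
            let new_account := data_key_value_pairs.foldl
              (fun d (p : String × String) => d.insert p.1 p.2)
              (PySem.Dict.empty : PySem.Dict String String)
            new_data ++ [new_account.items]
      else new_data ++ [account])
      = fun acc account => acc ++ [accA newDataKey newDataValue account] := by
    funext acc account
    simp only [accA]
    by_cases hmem : newDataKey ∉ account.map (fun p => p.1)
    · rw [if_pos hmem, if_pos hmem]
      cases hidx : PySem.List.index? (account.map (fun p => p.1)) "units" <;> simp
    · rw [if_neg hmem, if_neg hmem]
  rw [hb, PySem.List.foldl_append_singleton_eq_map]
  simp

lemma update_data_alt_eq_map (newDataKey newDataValue : String) (data : List (List (String × String))) :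
    update_data_alt newDataKey newDataValue data = data.map (accB newDataKey newDataValue) := by
  induction data with
  | nil => rfl
  | cons account tl ih =>
      rw [List.map_cons, ← ih]
      show (let rest := update_data_alt newDataKey newDataValue tl
            if newDataKey ∈ account.map (fun p => p.1) then account :: rest
            else
              match insertBeforeUnits newDataKey newDataValue account with
              | none => account :: rest
              | some l => (PySem.Dict.ofList l).items :: rest)
          = accB newDataKey newDataValue account :: update_data_alt newDataKey newDataValue tl
      simp only [accB]
      by_cases hmem : newDataKey ∈ account.map (fun p => p.1)
      · simp [hmem]
      · simp only [hmem, if_false]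
        cases insertBeforeUnits newDataKey newDataValue account <;> simp

-- the first occurrence of "units" splits the account
lemma first_units {account : List (String × String)}
    (h : "units" ∈ account.map (fun p => p.1)) :
    ∃ p v s, account = p ++ ("units", v) :: s ∧ "units" ∉ p.map (fun q => q.1) := by
  induction account with
  | nil => simp at h
  | cons a rest ih =>
    by_cases ha : a.1 = "units"
    · exact ⟨[], a.2, rest, by simp [← ha], by simp⟩
    · have h' : "units" ∈ rest.map (fun p => p.1) := by
        rcases (by simpa using h : "units" = a.1 ∨ "units" ∈ rest.map (fun p => p.1)) with h1 | h1
        · exact absurd h1.symm ha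
        · exact h1
      obtain ⟨p, v, s, he, hp⟩ := ih h'
      exact ⟨a :: p, v, s, by simp [he], by
        simp only [List.map_cons, List.mem_cons]
        rintro (h1 | h1)
        · exact ha h1.symm
        · exact hp h1⟩

lemma insertBeforeUnits_spliced (nk nv v : String) (p s : List (String × String))
    (hup : "units" ∉ p.map (fun q => q.1)) :
    insertBeforeUnits nk nv (p ++ ("units", v) :: s) = some (p ++ (nk, nv) :: ("units", v) :: s) := by
  induction p with
  | nil => simp [insertBeforeUnits]
  | cons a p ih =>
      have ha : a.1 ≠ "units" := fun he => hup (by simp [he])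
      have hup' : "units" ∉ p.map (fun q => q.1) := fun hm => hup (by simp [hm])
      simp [insertBeforeUnits, ha, ih hup']

lemma ofList_items_of_nodup (l : List (String × String))
    (hnd : (l.map (fun q => q.1)).Nodup) :
    (PySem.Dict.ofList l).items = l := by
  show ((PySem.Dict.empty : PySem.Dict String String).update l).items = l
  show (l.foldl (fun acc (p : String × String) => acc.insert p.1 p.2)
      (PySem.Dict.empty : PySem.Dict String String)).items = l
  have := PySem.Dict.items_foldl_insert_fresh l (fun q => q.1) (fun q => q.2)
    (PySem.Dict.empty : PySem.Dict String String) (by intro a _; simp) hnd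
  simpa using this

lemma spliced_nodup (nk nv v : String) (p s : List (String × String))
    (hnd : (((p ++ ("units", v) :: s)).map (fun q => q.1)).Nodup)
    (hnk : nk ∉ ((p ++ ("units", v) :: s)).map (fun q => q.1)) :
    ((p ++ (nk, nv) :: ("units", v) :: s).map (fun q => q.1)).Nodup := by
  have hmap : ((p ++ ("units", v) :: s).map (fun q => q.1))
      = p.map (fun q => q.1) ++ "units" :: s.map (fun q => q.1) := by simp
  rw [hmap] at hnd hnk
  obtain ⟨hpnd, hcnd, hdisj⟩ := List.nodup_append.mp hnd
  have hup : "units" ∉ p.map (fun q => q.1) := fun hmem => hdisj _ hmem _ (by simp) rfl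
  have hus : "units" ∉ s.map (fun q => q.1) := (List.nodup_cons.mp hcnd).1
  have hsnd : (s.map (fun q => q.1)).Nodup := (List.nodup_cons.mp hcnd).2
  have hnkp : nk ∉ p.map (fun q => q.1) := fun hmem => hnk (by simp [hmem])
  have hnku : nk ≠ "units" := fun hmem => hnk (by simp [hmem])
  have hnks : nk ∉ s.map (fun q => q.1) := fun hmem => hnk (by simp [hmem])
  simp only [List.map_append, List.map_cons]
  rw [List.nodup_append]
  refine ⟨hpnd, ?_, ?_⟩
  · rw [List.nodup_cons, List.nodup_cons]
    refine ⟨?_, ⟨hus, hsnd⟩⟩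
    simp only [List.mem_cons]
    rintro (hm | hm)
    · exact hnku hm
    · exact hnks hm
  · intro x hx y hy
    simp only [List.mem_cons] at hy
    rcases hy with hm | hm | hm
    · exact fun heq => hnkp ((heq.trans hm) ▸ hx)
    · exact fun heq => hup ((heq.trans hm) ▸ hx)
    · exact hdisj _ hx _ (List.mem_cons_of_mem _ hm)

lemma accA_items (nk nv v : String) (p s : List (String × String))
    (hnd : (((p ++ ("units", v) :: s)).map (fun q => q.1)).Nodup)
    (hnk : nk ∉ ((p ++ ("units", v) :: s)).map (fun q => q.1)) :
    accA nk nv (p ++ ("units", v) :: s) = p ++ (nk, nv) :: ("units", v) :: s := by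
  have hmap : ((p ++ ("units", v) :: s).map (fun q => q.1))
      = p.map (fun q => q.1) ++ "units" :: s.map (fun q => q.1) := by simp
  have hnd' := hnd; have hnk' := hnk
  rw [hmap] at hnd' hnk'
  obtain ⟨hpnd, hcnd, hdisj⟩ := List.nodup_append.mp hnd'
  have hup : "units" ∉ p.map (fun q => q.1) := fun hmem => hdisj _ hmem _ (by simp) rfl
  unfold accA
  rw [if_pos hnk]
  have hidx : PySem.List.index? ((p ++ ("units", v) :: s).map (fun q => q.1)) "units"
      = some p.length := by
    rw [hmap]
    exact (PySem.List.index?_eq_some_iff _ _ _).mpr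
      ⟨p.map (fun q => q.1), s.map (fun q => q.1), rfl, by simp, hup⟩
  rw [hidx]
  show (List.foldl (fun d (q : String × String) => d.insert q.1 q.2)
      (PySem.Dict.empty : PySem.Dict String String)
      (PySem.List.insert (p ++ ("units", v) :: s) ((p.length : Nat) : Int) (nk, nv))).items
    = p ++ (nk, nv) :: ("units", v) :: s
  have hins : PySem.List.insert (p ++ ("units", v) :: s) ((p.length : Nat) : Int) (nk, nv)
      = p ++ (nk, nv) :: ("units", v) :: s := by
    rw [PySem.List.insert_natCast _ p.length _ (by simp)]
    simp
  rw [hins]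
  have h4 := PySem.Dict.items_foldl_insert_fresh (p ++ (nk, nv) :: ("units", v) :: s)
    (fun q => q.1) (fun q => q.2)
    (PySem.Dict.empty : PySem.Dict String String) (by intro a _; simp)
    (spliced_nodup nk nv v p s hnd hnk)
  simpa using h4

lemma acc_eq (nk nv : String) (account : List (String × String))
    (hnd : (account.map (fun p => p.1)).Nodup)
    (hu : nk ∈ account.map (fun p => p.1) ∨ "units" ∈ account.map (fun p => p.1)) :
    accA nk nv account = accB nk nv account := by
  by_cases hmem : nk ∈ account.map (fun p => p.1)
  · simp [accA, accB, hmem]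
  · have hu' : "units" ∈ account.map (fun p => p.1) := hu.resolve_left hmem
    obtain ⟨p, v, s, rfl, hup⟩ := first_units hu'
    rw [accA_items nk nv v p s hnd hmem]
    unfold accB
    rw [if_neg hmem, insertBeforeUnits_spliced nk nv v p s hup]
    exact (ofList_items_of_nodup _ (spliced_nodup nk nv v p s hnd hmem)).symm

-- ===== VERDICT (by name: the statement is the Claim_ definition above) =====
theorem update_data_spec : Claim_equal_update_data := by
  intro nk nv data _hdom hpre
  unfold Spec_update_data
  rw [update_data_eq_map, update_data_alt_eq_map]
  apply List.map_congr_left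
  intro account hacc
  exact acc_eq nk nv account ((pre_elim hpre) account hacc).1 ((pre_elim hpre) account hacc).2
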